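-- pv_equiv track=rewrite | github.com/Alejo-UTN/Parser_test | Lexer_tp.py | afdtoken13
-- ===== SOURCE A (Python) =====
-- estadofinal = "estado_final"
--
-- estadonofinal = "estado2 no aceptado"
--
-- estadotrampa = "esta en estado2 trampa"
--
-- def afdtoken13(lexema):
--         estado13 = 0
--         estadofinal13 = [1]
--         for caracter in lexema :
--             if estado13 == 0 and caracter == '=' :
--                 estado13 = 1
--             else:
--                 estado13 = -1
--                 break
--         if estado13 == -1 :
--             return estadotrampa
--         if estado13 in estadofinal13 :
--             return estadofinal
--         else:
--             return estadonofinal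
-- ===== SOURCE B (Python) =====
-- estadofinal = "estado_final"
-- estadonofinal = "estado2 no aceptado"
-- estadotrampa = "esta en estado2 trampa"
--
-- def afdtoken13(lexema):
--     items = list(lexema)
--     if items == ['=']:
--         return estadofinal
--     if not items:
--         return estadonofinal
--     return estadotrampa
-- ===== Notes on version B (the rewrite author's own statement) =====
-- stated objective: simpler
-- what changed: Replaces the state-variable DFA loop (with break and trap state) by a direct structural comparison of the materialised character list against ['='] / [].
import Mathlib
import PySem

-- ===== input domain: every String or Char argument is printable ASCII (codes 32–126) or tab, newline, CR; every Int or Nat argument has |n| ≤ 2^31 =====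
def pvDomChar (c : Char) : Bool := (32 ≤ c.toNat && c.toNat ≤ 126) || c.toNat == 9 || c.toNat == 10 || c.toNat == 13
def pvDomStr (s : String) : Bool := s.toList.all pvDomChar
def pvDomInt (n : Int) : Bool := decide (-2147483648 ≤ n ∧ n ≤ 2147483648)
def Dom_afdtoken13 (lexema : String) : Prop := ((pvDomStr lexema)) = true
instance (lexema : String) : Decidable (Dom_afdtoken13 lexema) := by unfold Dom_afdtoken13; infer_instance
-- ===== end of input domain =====

-- B replaces the state-variable DFA loop by a direct structural comparison; objective: simpler.

-- ===== PORT A =====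
-- the for-loop with break: state estado13, set to -1 and stop on any mismatch
def afdLoopA : Int → List Char → Int
  | s, [] => s
  | s, c :: cs => if s == 0 && c == '=' then afdLoopA 1 cs else -1

def afdtoken13 (lexema : String) : String :=
  let estado13 := afdLoopA 0 lexema.toList
  if estado13 == -1 then "esta en estado2 trampa"
  else if [( (1 : Int) )].contains estado13 then "estado_final"
  else "estado2 no aceptado"

-- ===== PORT B =====
def afdtoken13_alt (lexema : String) : String :=
  let items := lexema.toList
  if items == ['='] then "estado_final"
  else if items == [] then "estado2 no aceptado"
  else "esta en estado2 trampa"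

-- ===== PRECONDITION & SPEC =====
def Spec_afdtoken13 (lexema : String) (out : String) : Prop := out = afdtoken13_alt lexema
instance (lexema : String) (out : String) : Decidable (Spec_afdtoken13 lexema out) := by unfold Spec_afdtoken13; infer_instance

-- ===== CLAIM (what is proved, stated in full; the proofs are below) =====
def Claim_equal_afdtoken13 : Prop := ∀ (lexema : String), Dom_afdtoken13 lexema → Spec_afdtoken13 lexema (afdtoken13 lexema)

-- ===== LEMMAS AND PROOFS =====
theorem afd_eq_on_list (l : List Char) :
    (let e := afdLoopA 0 l;
     if e == -1 then "esta en estado2 trampa"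
     else if [( (1 : Int) )].contains e then "estado_final"
     else "estado2 no aceptado")
    = (if l == ['='] then "estado_final"
       else if l == [] then "estado2 no aceptado"
       else "esta en estado2 trampa") := by
  match l with
  | [] => rfl
  | [c] =>
    by_cases h : c = '='
    · subst h; rfl
    · simp [afdLoopA, h]
  | c :: d :: rest =>
    by_cases h : c = '='
    · subst h; simp [afdLoopA]
    · simp [afdLoopA, h]

-- ===== VERDICT (by name: the statement is the Claim_ definition above) =====
theorem afdtoken13_spec : Claim_equal_afdtoken13 := by
  intro lexema _
  unfold Spec_afdtoken13 afdtoken13 afdtoken13_alt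
  exact afd_eq_on_list lexema.toList
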